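-- pv_equiv track=rewrite | github.com/ArturDuisheev/python_drf_postgres_api_project | books/store/digit_to_number.py | number_digit
-- ===== SOURCE A (Python) =====
-- def number_digit(number: int) -> str:
--     """Разбивает целое число number на строку в виде суммы чисел по разрядам"""
--
--     # Проверяем положительное ли число
--     if number < 0:
--         raise ValueError('Число должно быть положительным')
--     #  Если число меньше или равно 10 то его сразу помещают в строку
--     if number <= 10:
--         return str(number)
--
--     # Список для элементов числа
--     final_str = []
--
--     # Циклом проходим по разрядам от самого большого и значение каждого разряда помещаем в список,
--     # после чего уменьшаем начального число на данный разряд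
--     for i in range(len(str(number)), 0, -1):
--         cur_dig = (str((number // 10 ** (i - 1)) * 10 ** (i - 1)))
--         number -= int(cur_dig)
--         final_str.append(cur_dig)
--
--     return ' + '.join(final_str)
-- ===== SOURCE B (Python) =====
-- def number_digit(number: int) -> str:
--     """Разбивает целое число number на строку в виде суммы чисел по разрядам"""
--     if number < 0:
--         raise ValueError('Число должно быть положительным')
--     if number <= 10:
--         return str(number)
--     # Peel each place value straight off the original number, least significant
--     # first, then reverse: no mutable running remainder is threaded through.
--     parts = [str(number // 10 ** k % 10 * 10 ** k) for k in range(len(str(number)))]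
--     return ' + '.join(reversed(parts))
-- ===== Notes on version B (the rewrite author's own statement) =====
-- stated objective: simpler
-- what changed: B derives each place value directly from the original number with floordiv/mod in a single LSB-first comprehension and reverses the list, instead of A's MSB loop that mutates a running remainder via division, round-trip str/int conversion and subtraction.
import Mathlib
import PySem

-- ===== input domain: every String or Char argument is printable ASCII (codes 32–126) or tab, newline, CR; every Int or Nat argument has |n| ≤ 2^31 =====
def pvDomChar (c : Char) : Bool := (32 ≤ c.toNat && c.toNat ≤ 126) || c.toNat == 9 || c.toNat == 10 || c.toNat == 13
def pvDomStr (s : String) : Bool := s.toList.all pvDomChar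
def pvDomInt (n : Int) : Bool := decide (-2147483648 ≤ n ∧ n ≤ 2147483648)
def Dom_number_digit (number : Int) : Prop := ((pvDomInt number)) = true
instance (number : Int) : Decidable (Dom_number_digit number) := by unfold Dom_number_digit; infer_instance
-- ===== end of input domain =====

-- B peels each place value straight off the original number (LSB-first comprehension,
-- then reversed) instead of A's MSB loop that mutates a running remainder; simpler, same cost.

-- ===== PORT A =====
-- `number -= int(cur_dig)` subtracts int(str(v)) = v, ported as subtracting the value directly.
def number_digit (number : Int) : String :=
  if number < 0 then ""   -- Python raises ValueError here; excluded by Pre_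
  else if number ≤ 10 then PySem.Int.toStr number
  else
    let st := (PySem.List.pyRange (PySem.Str.len (PySem.Int.toStr number)) 0 (-1)).foldl
      (fun (st : Int × List String) i =>
        let curval := PySem.Int.floordiv st.1 ((10:Int) ^ (i-1).toNat) * (10:Int) ^ (i-1).toNat
        (st.1 - curval, st.2 ++ [PySem.Int.toStr curval]))
      (number, [])
    PySem.Str.join " + " st.2

-- ===== PORT B =====
def number_digit_alt (number : Int) : String :=
  if number < 0 then ""   -- Python raises ValueError here; excluded by Pre_
  else if number ≤ 10 then PySem.Int.toStr number
  else
    let parts := (PySem.List.pyRange 0 (PySem.Str.len (PySem.Int.toStr number)) 1).map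
      (fun k => PySem.Int.toStr
        (PySem.Int.mod (PySem.Int.floordiv number ((10:Int) ^ k.toNat)) 10 * (10:Int) ^ k.toNat))
    PySem.Str.join " + " parts.reverse

-- ===== PRECONDITION & SPEC =====
-- Pre_ excludes exactly the negative inputs, on which A raises ValueError.
def Pre_number_digit (number : Int) : Prop := 0 ≤ number
instance (number : Int) : Decidable (Pre_number_digit number) := by unfold Pre_number_digit; infer_instance
def pvWitness_number_digit : Int := (105)

def Spec_number_digit (number : Int) (out : String) : Prop := out = number_digit_alt number
instance (number : Int) (out : String) : Decidable (Spec_number_digit number out) := by unfold Spec_number_digit; infer_instance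

-- ===== CLAIM (what is proved, stated in full; the proofs are below) =====
def Claim_equal_number_digit : Prop := ∀ (number : Int), Dom_number_digit number → Pre_number_digit number → Spec_number_digit number (number_digit number)

-- ===== LEMMAS AND PROOFS =====

-- each digit position survives truncation by a higher power of ten
lemma digit_stable (n : Int) (hn : 0 ≤ n) {k i : Nat} (hk : k < i) :
    (n % (10:Int) ^ i) / (10:Int) ^ k % 10 = n / (10:Int) ^ k % 10 := by
  obtain ⟨m, rfl⟩ := Int.eq_ofNat_of_zero_le hn
  have h1 : ((10:Int) ^ i) = ((10 ^ i : Nat) : Int) := by push_cast; ring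
  have h2 : ((10:Int) ^ k) = ((10 ^ k : Nat) : Int) := by push_cast; ring
  have hik : 10 ^ i = 10 ^ k * 10 ^ (i - k) := by
    rw [← pow_add]; congr 1; omega
  have key : m % 10 ^ i / 10 ^ k % 10 = m / 10 ^ k % 10 := by
    rw [hik, Nat.mod_mul_right_div_self]
    exact Nat.mod_mod_of_dvd _ (dvd_pow_self 10 (by omega))
  exact_mod_cast congrArg (Nat.cast : Nat → Int) key

-- length of Nat.toDigits via Nat.log
lemma toDigitsCore_len (f : Nat) : ∀ n acc, n < f →
    (Nat.toDigitsCore 10 f n acc).length = Nat.log 10 n + 1 + acc.length := by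
  induction f with
  | zero => intro n acc h; omega
  | succ f ih =>
    intro n acc h
    rw [Nat.toDigitsCore]
    by_cases h10 : n / 10 = 0
    · have : n < 10 := by omega
      simp [h10, Nat.log_eq_zero_iff.mpr (Or.inl this)]
      omega
    · have hn : 10 ≤ n := by
        by_contra hc; exact h10 (Nat.div_eq_of_lt (by omega))
      have hrec : n / 10 < f := by
        have := Nat.div_lt_self (by omega : 0 < n) (by omega : 1 < 10)
        omega
      simp only [h10, if_false]
      rw [ih _ _ hrec]
      have hlog : Nat.log 10 (n / 10) = Nat.log 10 n - 1 := Nat.log_div_base 10 n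
      have hpos : 0 < Nat.log 10 n := Nat.log_pos (by omega) hn
      simp [hlog]; omega

-- a nonnegative int is below 10 ^ (length of its decimal string)
lemma lt_pow_len (n : Int) (hn : 0 ≤ n) :
    n < (10:Int) ^ (PySem.Int.toChars n).length := by
  have hneg : ¬ n < 0 := by omega
  rw [PySem.Int.toChars, if_neg hneg]
  unfold Nat.toDigits
  rw [toDigitsCore_len (n.toNat + 1) n.toNat [] (by omega)]
  have := Nat.lt_pow_succ_log_self (by omega : 1 < 10) n.toNat
  have hcast : ((10:Int) ^ (Nat.log 10 n.toNat + 1 + 0)) = ((10 ^ (Nat.log 10 n.toNat + 1) : Nat) : Int) := by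
    push_cast; ring
  simp only [List.length_nil] at *
  rw [hcast]
  omega

-- the digit-extraction function both sides produce strings of
def digF (n : Int) (k : Nat) : String :=
  PySem.Int.toStr (n / (10:Int) ^ k % 10 * (10:Int) ^ k)

-- main loop lemma: A's countdown fold produces the reversed LSB-first digit list
lemma loopA_eq (i : Nat) : ∀ (n : Int) (acc : List String), 0 ≤ n → n < (10:Int) ^ i →
    ((PySem.List.pyRange (i : Int) 0 (-1)).foldl
      (fun (st : Int × List String) j =>
        let curval := PySem.Int.floordiv st.1 ((10:Int) ^ (j-1).toNat) * (10:Int) ^ (j-1).toNat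
        (st.1 - curval, st.2 ++ [PySem.Int.toStr curval]))
      (n, acc)).2
    = acc ++ (((List.range i).map (fun k => digF n k)).reverse) := by
  induction i with
  | zero =>
    intro n acc hn hlt
    rw [PySem.List.pyRange_neg_one_eq_nil (by omega)]
    simp
  | succ i ih =>
    intro n acc hn hlt
    have hcast : ((i : Int) + 1) = ((i + 1 : Nat) : Int) := by push_cast; ring
    rw [← hcast] at *
    rw [PySem.List.pyRange_neg_one_cons (by omega), List.foldl_cons]
    have hp : (0:Int) < (10:Int) ^ i := by positivity
    have hexp : (((i:Int) + 1 - 1).toNat) = i := by omega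
    simp only [hexp, PySem.Int.floordiv_eq_ediv_of_pos hp]
    have hstep : (i:Int) + 1 - 1 = (i:Int) := by ring
    rw [hstep]
    have hdiv : n / (10:Int) ^ i < 10 := by
      have : n < 10 * (10:Int) ^ i := by
        calc n < (10:Int) ^ (i+1) := hlt
        _ = 10 * (10:Int)^i := by ring
      exact Int.ediv_lt_of_lt_mul hp (by linarith)
    have hdiv0 : 0 ≤ n / (10:Int) ^ i := Int.ediv_nonneg hn (by positivity)
    have hmod : n / (10:Int)^i % 10 = n / (10:Int)^i := Int.emod_eq_of_lt hdiv0 hdiv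
    have hrem : n - n / (10:Int)^i * (10:Int)^i = n % (10:Int)^i := by
      rw [Int.emod_def]; ring
    rw [hrem, ih (n % (10:Int)^i) _ (Int.emod_nonneg n (by positivity)) (Int.emod_lt_of_pos n hp)]
    have hmapeq : (List.range i).map (fun k => digF (n % (10:Int)^i) k)
        = (List.range i).map (fun k => digF n k) := by
      apply List.map_congr_left
      intro k hk
      rw [List.mem_range] at hk
      simp only [digF]
      rw [digit_stable n hn hk]
    rw [hmapeq, List.range_succ, List.map_append]
    simp only [List.map_cons, List.map_nil, List.reverse_append, List.reverse_cons,
      List.reverse_nil, List.nil_append, List.singleton_append, List.append_assoc]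
    simp [digF, hmod]

-- ===== VERDICT (by name: the statement is the Claim_ definition above) =====
set_option maxHeartbeats 1000000 in
theorem number_digit_spec : Claim_equal_number_digit := by
  intro number _ hpre
  replace hpre : (0:Int) ≤ number := hpre
  unfold Spec_number_digit number_digit number_digit_alt
  have hneg : ¬ number < 0 := by omega
  rw [if_neg hneg, if_neg hneg]
  by_cases h10 : number ≤ 10
  · rw [if_pos h10, if_pos h10]
  · rw [if_neg h10, if_neg h10]
    have hlen : PySem.Str.len (PySem.Int.toStr number)
        = ((PySem.Int.toChars number).length : Int) := by
      rw [PySem.Str.len_eq, PySem.Int.toList_toStr]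
    set L : Nat := (PySem.Int.toChars number).length with hL
    have hlt : number < (10:Int) ^ L := lt_pow_len number hpre
    simp only []
    refine congrArg (PySem.Str.join " + ") ?_
    rw [hlen, loopA_eq L number [] hpre hlt, List.nil_append]
    have hmap : (PySem.List.pyRange 0 (L : Int) 1).map
        (fun k => PySem.Int.toStr
          (PySem.Int.mod (PySem.Int.floordiv number ((10:Int) ^ k.toNat)) 10 * (10:Int) ^ k.toNat))
        = (List.range L).map (fun k => digF number k) := by
      rw [PySem.List.pyRange_one, List.map_map]
      have hsub : ((L:Int) - 0).toNat = L := by omega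
      rw [hsub]
      apply List.map_congr_left
      intro k hk
      simp only [Function.comp]
      have h0k : ((0:Int) + (k:Int)).toNat = k := by omega
      rw [digF]
      have hp : (0:Int) < (10:Int) ^ k := by positivity
      simp [h0k, PySem.Int.floordiv_eq_ediv_of_pos hp,
        PySem.Int.mod_eq_emod_of_pos (by omega : (0:Int) < 10)]
    rw [hmap]
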